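-- pv_equiv track=rewrite | github.com/Starrysky0201/BidirectionalTransformer | main.py | encode_sentence
-- ===== SOURCE A (Python) =====
-- UNK = 1
--
-- def encode_sentence(en_sents, cn_sents, en_vocab, cn_vocab, sort = True):
--     """
--     将英文、中文单词转化为单词索引列表
--     """
--     length = len(en_sents)
--     en_encode = [[en_vocab.get(word, UNK) for word in sent] for sent in en_sents]
--     cn_encode = [[cn_vocab.get(word, UNK) for word in sent] for sent in cn_sents]
--
--     def len_argsort(seq):
--         return sorted(range(len(seq)), key = lambda x : len(seq[x]))
--     if sort:
--         sorted_idx = len_argsort(en_encode)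
--         en_encode = [en_encode[idx] for idx in sorted_idx]
--         cn_encode = [cn_encode[idx] for idx in sorted_idx]
--     return en_encode, cn_encode
-- ===== SOURCE B (Python) =====
-- UNK = 1
--
-- def encode_sentence(en_sents, cn_sents, en_vocab, cn_vocab, sort = True):
--     """Encode words to vocab indices; if sort, distribution-sort the pairs by
--     English length: comparison-sort only the distinct lengths, then sweep each
--     length in increasing order emitting the matching pairs (stable)."""
--     en_encode = [[en_vocab.get(word, UNK) for word in sent] for sent in en_sents]
--     cn_encode = [[cn_vocab.get(word, UNK) for word in sent] for sent in cn_sents]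
--     if sort:
--         lengths = [len(s) for s in en_encode]
--         en_sorted, cn_sorted = [], []
--         for L in sorted(set(lengths)):
--             for i, n in enumerate(lengths):
--                 if n == L:
--                     en_sorted.append(en_encode[i])
--                     cn_sorted.append(cn_encode[i])
--         en_encode, cn_encode = en_sorted, cn_sorted
--     return en_encode, cn_encode
-- ===== Notes on version B (the rewrite author's own statement) =====
-- stated objective: alternative
-- what changed: Replaces the argsort-and-permute comparison sort by a distribution (counting-style) sort: no permutation and no comparison sort of the data -- only the distinct lengths are comparison-sorted, and a stable sweep per ascending length emits the matching encoded pairs directly into the two output lists.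
import Mathlib
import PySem

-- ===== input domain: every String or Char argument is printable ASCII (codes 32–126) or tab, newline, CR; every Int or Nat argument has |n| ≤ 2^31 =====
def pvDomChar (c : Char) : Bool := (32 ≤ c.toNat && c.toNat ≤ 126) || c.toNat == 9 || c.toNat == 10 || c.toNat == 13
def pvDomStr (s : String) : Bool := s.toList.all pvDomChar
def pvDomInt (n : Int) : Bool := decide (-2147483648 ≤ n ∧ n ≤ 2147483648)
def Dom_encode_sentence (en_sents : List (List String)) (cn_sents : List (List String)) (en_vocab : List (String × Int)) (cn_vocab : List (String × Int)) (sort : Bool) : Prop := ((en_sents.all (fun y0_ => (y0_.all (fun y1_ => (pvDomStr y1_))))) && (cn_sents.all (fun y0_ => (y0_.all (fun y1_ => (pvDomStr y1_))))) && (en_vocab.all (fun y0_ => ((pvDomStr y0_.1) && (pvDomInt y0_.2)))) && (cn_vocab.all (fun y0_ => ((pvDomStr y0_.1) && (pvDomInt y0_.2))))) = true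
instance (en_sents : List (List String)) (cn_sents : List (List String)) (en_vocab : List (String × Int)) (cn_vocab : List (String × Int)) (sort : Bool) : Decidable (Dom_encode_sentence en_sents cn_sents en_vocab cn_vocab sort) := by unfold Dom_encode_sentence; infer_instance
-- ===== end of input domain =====

-- B replaces A's argsort-and-permute by a distribution sort: sort the distinct lengths,
-- then sweep each length in increasing order emitting matching pairs (objective: alternative).

-- ===== PORT A =====
-- dict.get(word, UNK) on the association-list vocab
def pvLookup (vocab : List (String × Int)) (w : String) : Int :=
  PySem.Dict.getD (PySem.Dict.mk vocab) w 1

-- def len_argsort(seq): return sorted(range(len(seq)), key = lambda x : len(seq[x]))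
-- (seq[x] is in range for x in range(len(seq)), so pyGetD with default [] is exact here)
def pvLenArgsort (seq : List (List Int)) : List Int :=
  PySem.List.sorted (PySem.List.pyRange 0 (PySem.List.len seq))
    (fun x => (PySem.List.pyGetD seq x []).length)

def encode_sentence (en_sents : List (List String)) (cn_sents : List (List String)) (en_vocab : List (String × Int)) (cn_vocab : List (String × Int)) (sort : Bool) : List (List Int) × List (List Int) :=
  let en_encode := en_sents.map (fun sent => sent.map (fun word => pvLookup en_vocab word))
  let cn_encode := cn_sents.map (fun sent => sent.map (fun word => pvLookup cn_vocab word))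
  if sort then
    let sorted_idx := pvLenArgsort en_encode
    -- cn_encode[idx] raises IndexError when idx ≥ len(cn_encode); Pre_ excludes that, default [] is never taken inside Pre_
    (sorted_idx.map (fun idx => PySem.List.pyGetD en_encode idx []),
     sorted_idx.map (fun idx => PySem.List.pyGetD cn_encode idx []))
  else (en_encode, cn_encode)

-- ===== PORT B =====
def encode_sentence_alt (en_sents : List (List String)) (cn_sents : List (List String)) (en_vocab : List (String × Int)) (cn_vocab : List (String × Int)) (sort : Bool) : List (List Int) × List (List Int) :=
  let en_encode := en_sents.map (fun sent => sent.map (fun word => pvLookup en_vocab word))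
  let cn_encode := cn_sents.map (fun sent => sent.map (fun word => pvLookup cn_vocab word))
  if sort then
    let lengths := en_encode.map (fun s => (s.length : Int))
    -- for L in sorted(set(lengths)): for i, n in enumerate(lengths): if n == L: append both
    -- (cn_encode[i] raises IndexError when i ≥ len(cn_encode); Pre_ excludes that, default [] never taken inside Pre_)
    (PySem.List.sorted (PySem.Set.ofList lengths) (fun x => x)).foldl
      (fun acc L =>
        (PySem.List.enumerate lengths).foldl
          (fun acc2 p =>
            if p.2 = L then
              (acc2.1 ++ [PySem.List.pyGetD en_encode p.1 []],
               acc2.2 ++ [PySem.List.pyGetD cn_encode p.1 []])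
            else acc2) acc)
      ([], [])
  else (en_encode, cn_encode)

-- ===== PRECONDITION & SPEC =====
-- Pre_ excludes exactly the inputs where A raises IndexError: sort=True with cn_sents shorter
-- than en_sents (sorted_idx then contains an index ≥ len(cn_encode)).
def Pre_encode_sentence (en_sents : List (List String)) (cn_sents : List (List String)) (en_vocab : List (String × Int)) (cn_vocab : List (String × Int)) (sort : Bool) : Prop :=
  sort = true → en_sents.length ≤ cn_sents.length
instance (en_sents : List (List String)) (cn_sents : List (List String)) (en_vocab : List (String × Int)) (cn_vocab : List (String × Int)) (sort : Bool) : Decidable (Pre_encode_sentence en_sents cn_sents en_vocab cn_vocab sort) := by unfold Pre_encode_sentence; infer_instance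

def pvWitness_encode_sentence : List (List String) × List (List String) × (List (String × Int)) × (List (String × Int)) × Bool :=
  ([["a", "b"], ["a"]], [["x"], ["y", "z"]], [("a", 5)], [("y", 7)], true)

def Spec_encode_sentence (en_sents : List (List String)) (cn_sents : List (List String)) (en_vocab : List (String × Int)) (cn_vocab : List (String × Int)) (sort : Bool) (out : List (List Int) × List (List Int)) : Prop := out = encode_sentence_alt en_sents cn_sents en_vocab cn_vocab sort
instance (en_sents : List (List String)) (cn_sents : List (List String)) (en_vocab : List (String × Int)) (cn_vocab : List (String × Int)) (sort : Bool) (out : List (List Int) × List (List Int)) : Decidable (Spec_encode_sentence en_sents cn_sents en_vocab cn_vocab sort out) := by unfold Spec_encode_sentence; infer_instance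

-- ===== CLAIM (what is proved, stated in full; the proofs are below) =====
def Claim_equal_encode_sentence : Prop := ∀ (en_sents : List (List String)) (cn_sents : List (List String)) (en_vocab : List (String × Int)) (cn_vocab : List (String × Int)) (sort : Bool), Dom_encode_sentence en_sents cn_sents en_vocab cn_vocab sort → Pre_encode_sentence en_sents cn_sents en_vocab cn_vocab sort → Spec_encode_sentence en_sents cn_sents en_vocab cn_vocab sort (encode_sentence en_sents cn_sents en_vocab cn_vocab sort)

-- ===== LEMMAS AND PROOFS =====

-- insertion into a mapped list commutes with the map when the key factors through the map
theorem insertBy_map {α β κ : Type} [LinearOrder κ] (f : α → β) (key : β → κ) (x : α) (ys : List α) :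
    PySem.List.insertBy (fun a b => decide (key a < key b)) (f x) (ys.map f)
      = (PySem.List.insertBy (fun a b => decide (key (f a) < key (f b))) x ys).map f := by
  induction ys with
  | nil => simp [PySem.List.insertBy]
  | cons y ys ih =>
    simp only [List.map_cons, PySem.List.insertBy]
    split_ifs <;> simp_all

-- stable sort commutes with map: sorted(map f xs, key) = map f (sorted xs, key ∘ f)
theorem sorted_map_comm {α β κ : Type} [LinearOrder κ] (f : α → β) (key : β → κ) (xs : List α) :
    PySem.List.sorted (xs.map f) key = (PySem.List.sorted xs (fun x => key (f x))).map f := by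
  rw [PySem.List.sorted_eq_foldl_insertBy, PySem.List.sorted_eq_foldl_insertBy]
  have aux : ∀ (l : List α) (acc : List α),
      (l.map f).foldl (fun acc x => PySem.List.insertBy (fun a b => decide (key a < key b)) x acc) (acc.map f)
        = (l.foldl (fun acc x => PySem.List.insertBy (fun a b => decide (key (f a) < key (f b))) x acc) acc).map f := by
    intro l
    induction l with
    | nil => intro acc; rfl
    | cons z l ih =>
      intro acc
      simp only [List.map_cons, List.foldl_cons]
      rw [insertBy_map f key, ih]
  simpa using aux xs []

-- a stable sort is insensitive to an order-embedding of the key (Nat cast to Int)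
theorem sorted_key_natCast {α : Type} (xs : List α) (key : α → Nat) :
    PySem.List.sorted xs (fun x => ((key x : Nat) : Int)) = PySem.List.sorted xs key := by
  rw [PySem.List.sorted_eq_foldl_insertBy, PySem.List.sorted_eq_foldl_insertBy]
  congr 1
  funext acc x
  congr 1
  funext a b
  simp

-- range(n) mapped through pyGetD is take n (n ≤ len C)
theorem map_pyGetD_pyRange_take {α : Type} (C : List α) (d : α) (n : Nat) (h : n ≤ C.length) :
    (PySem.List.pyRange 0 (n : Int)).map (fun i => PySem.List.pyGetD C i d) = C.take n := by
  induction n with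
  | zero => rfl
  | succ m ih =>
    have hm : m < C.length := h
    rw [show ((m + 1 : Nat) : Int) = (m : Int) + 1 by push_cast; ring,
        PySem.List.pyRange_one_succ_right (by omega : (0 : Int) ≤ (m : Int))]
    rw [List.map_append, ih (by omega)]
    have hg : PySem.List.pyGetD C (m : Int) d = C[m] := by
      simp [PySem.List.pyGetD, PySem.List.pyGet?, PySem.List.pyIdx?, hm]
    simp only [List.map_cons, List.map_nil]
    rw [hg, List.take_add_one, List.getElem?_eq_getElem hm]
    rfl

-- zip already truncates to the first list's length
theorem zip_take_right {α β : Type} (E : List α) (C : List β) : E.zip (C.take E.length) = E.zip C := by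
  induction E generalizing C with
  | nil => rfl
  | cons e E ih =>
    cases C with
    | nil => rfl
    | cons c C => simp [List.zip_cons_cons, ih]

-- the pair-building map over range(len E) is exactly zip (when len E ≤ len C)
theorem map_pair_range_eq_zip (E C : List (List Int)) (h : E.length ≤ C.length) :
    (PySem.List.pyRange 0 (PySem.List.len E)).map
        (fun i => (PySem.List.pyGetD E i [], PySem.List.pyGetD C i []))
      = E.zip C := by
  rw [← List.zip_map']
  rw [PySem.List.map_pyGetD_pyRange_zero E []]
  have hlen : PySem.List.len E = ((E.length : Nat) : Int) := by simp [PySem.List.len]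
  rw [hlen, map_pyGetD_pyRange_take C [] E.length h, zip_take_right]

-- flatMap congruence on members
theorem flatMap_congr_mem {α β : Type} {l : List α} {f g : α → List β}
    (h : ∀ a ∈ l, f a = g a) : l.flatMap f = l.flatMap g := by
  induction l with
  | nil => rfl
  | cons x l ih =>
    rw [List.flatMap_cons, List.flatMap_cons, h x (by simp), ih (fun a ha => h a (by simp [ha]))]

-- insertBy passes over a prefix it does not insert before
theorem insertBy_append_not {α : Type} (bf : α → α → Bool) (x : α) (l1 l2 : List α)
    (h : ∀ y ∈ l1, bf x y = false) :
    PySem.List.insertBy bf x (l1 ++ l2) = l1 ++ PySem.List.insertBy bf x l2 := by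
  induction l1 with
  | nil => rfl
  | cons y l1 ih =>
    rw [List.cons_append, PySem.List.insertBy]
    simp only [h y (by simp)]
    rw [ih (fun z hz => h z (by simp [hz]))]
    simp

-- insertBy puts x in front when it goes before everything
theorem insertBy_all {α : Type} (bf : α → α → Bool) (x : α) (l : List α)
    (h : ∀ y ∈ l, bf x y = true) :
    PySem.List.insertBy bf x l = x :: l := by
  cases l with
  | nil => rfl
  | cons y l => rw [PySem.List.insertBy]; simp [h y (by simp)]

-- inserting p into buckets sorted by strictly increasing key appends it to its bucket
theorem insertBy_flatMap {α : Type} (key : α → Int) (K : List Int) (f : Int → List α) (p : α)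
    (hK : K.Pairwise (· < ·)) (hmem : key p ∈ K)
    (hf : ∀ L ∈ K, ∀ q ∈ f L, key q = L) :
    PySem.List.insertBy (fun a b => decide (key a < key b)) p (K.flatMap f)
      = K.flatMap (fun L => f L ++ if key p = L then [p] else []) := by
  induction K with
  | nil => cases hmem
  | cons L K ih =>
    rw [List.flatMap_cons, List.flatMap_cons]
    obtain ⟨hLlt, hK'⟩ := List.pairwise_cons.1 hK
    by_cases hp : key p = L
    · have h1 : ∀ y ∈ f L, (fun a b => decide (key a < key b)) p y = false := by
        intro y hy
        have hk := hf L (by simp) y hy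
        simp [hk, hp]
      rw [insertBy_append_not _ _ _ _ h1]
      have h2 : ∀ y ∈ K.flatMap f, (fun a b => decide (key a < key b)) p y = true := by
        intro y hy
        obtain ⟨L', hL', hy'⟩ := List.mem_flatMap.1 hy
        have hk := hf L' (by simp [hL']) y hy'
        have hlt := hLlt L' hL'
        simp only [decide_eq_true_eq, hk, hp]
        omega
      rw [insertBy_all _ _ _ h2]
      have h3 : K.flatMap (fun L' => f L' ++ if key p = L' then [p] else []) = K.flatMap f := by
        apply flatMap_congr_mem
        intro L' hL'
        have : key p ≠ L' := by have := hLlt L' hL'; omega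
        simp [this]
      rw [h3, hp]
      simp
    · have hmem' : key p ∈ K := by
        cases List.mem_cons.1 hmem with
        | inl h => exact absurd h hp
        | inr h => exact h
      have hLp : L < key p := hLlt _ hmem'
      have h1 : ∀ y ∈ f L, (fun a b => decide (key a < key b)) p y = false := by
        intro y hy
        have hk := hf L (by simp) y hy
        simp only [decide_eq_false_iff_not, hk]
        omega
      rw [insertBy_append_not _ _ _ _ h1,
          ih hK' hmem' (fun L' hL' => hf L' (by simp [hL']))]
      simp [hp]

-- the gather of filters over strictly sorted covering keys IS the stable sort
theorem gather_eq_sorted {α : Type} (key : α → Int) (K : List Int)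
    (hK : K.Pairwise (· < ·)) :
    ∀ ps : List α, (∀ p ∈ ps, key p ∈ K) →
      K.flatMap (fun L => ps.filter (fun p => decide (key p = L))) = PySem.List.sorted ps key := by
  intro ps
  induction ps using List.reverseRecOn with
  | nil =>
    intro _
    rw [PySem.List.sorted_eq_foldl_insertBy]
    simp
  | append_singleton l p ih =>
    intro hcov
    rw [PySem.List.sorted_eq_foldl_insertBy, List.foldl_append, List.foldl_cons, List.foldl_nil,
        ← PySem.List.sorted_eq_foldl_insertBy]
    have hsplit : K.flatMap (fun L => (l ++ [p]).filter (fun q => decide (key q = L)))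
        = K.flatMap (fun L => l.filter (fun q => decide (key q = L))
            ++ if key p = L then [p] else []) := by
      apply flatMap_congr_mem
      intro L _
      rw [List.filter_append]
      by_cases h : key p = L <;> simp [h]
    rw [hsplit,
        ← insertBy_flatMap key K (fun L => l.filter (fun q => decide (key q = L))) p hK
          (hcov p (by simp))
          (fun L _ q hq => of_decide_eq_true (List.mem_filter.1 hq).2),
        ih (fun q hq => hcov q (by simp [hq]))]

-- the per-pair conditional double-append fold is filter-then-unzip
theorem foldl_ite_append_pair {α β : Type} (P : α × β → Prop) [DecidablePred P]
    (zs : List (α × β)) (acc : List α × List β) :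
    zs.foldl (fun a p => if P p then (a.1 ++ [p.1], a.2 ++ [p.2]) else a) acc
      = (acc.1 ++ (zs.filter (fun p => decide (P p))).map (fun p => p.1),
         acc.2 ++ (zs.filter (fun p => decide (P p))).map (fun p => p.2)) := by
  induction zs generalizing acc with
  | nil => simp
  | cons z zs ih =>
    rw [List.foldl_cons, List.filter_cons]
    by_cases hz : P z
    · rw [if_pos hz, ih]
      simp [hz]
    · rw [if_neg hz, ih]
      simp [hz]

-- a fold appending to both components is a pair of flatMaps
theorem foldl_append_pair2 {γ α β : Type} (K : List γ) (f : γ → List α) (g : γ → List β)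
    (acc : List α × List β) :
    K.foldl (fun a L => (a.1 ++ f L, a.2 ++ g L)) acc
      = (acc.1 ++ K.flatMap f, acc.2 ++ K.flatMap g) := by
  induction K generalizing acc with
  | nil => simp
  | cons L K ih =>
    rw [List.foldl_cons, ih, List.flatMap_cons]
    simp

-- B's inner loop over enumerate(lengths) = filter E.zip C by length, unzipped, appended
theorem inner_eq (E C : List (List Int)) (h : E.length ≤ C.length) (L : Int)
    (acc : List (List Int) × List (List Int)) :
    (PySem.List.enumerate (E.map (fun s => (s.length : Int)))).foldl
        (fun acc2 p =>
          if p.2 = L then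
            (acc2.1 ++ [PySem.List.pyGetD E p.1 []], acc2.2 ++ [PySem.List.pyGetD C p.1 []])
          else acc2) acc
      = (acc.1 ++ ((E.zip C).filter (fun p => decide (((p.1.length : Nat) : Int) = L))).map (fun p => p.1),
         acc.2 ++ ((E.zip C).filter (fun p => decide (((p.1.length : Nat) : Int) = L))).map (fun p => p.2)) := by
  rw [PySem.List.enumerate_eq_map_pyRange _ (0 : Int), List.foldl_map]
  have hkey : ∀ j : Int,
      PySem.List.pyGetD (E.map (fun s => (s.length : Int))) j 0
        = ((PySem.List.pyGetD E j []).length : Int) := by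
    intro j
    simpa using PySem.List.pyGetD_map (fun s : List Int => (s.length : Int)) E j []
  simp only [hkey]
  have hlen2 : PySem.List.len (E.map (fun s => (s.length : Int))) = PySem.List.len E := by
    simp [PySem.List.len]
  rw [hlen2,
      ← List.foldl_map (f := fun j => (PySem.List.pyGetD E j [], PySem.List.pyGetD C j []))
        (g := fun (acc2 : List (List Int) × List (List Int)) (p : List Int × List Int) =>
          if ((p.1.length : Nat) : Int) = L then (acc2.1 ++ [p.1], acc2.2 ++ [p.2]) else acc2),
      map_pair_range_eq_zip E C h]
  exact foldl_ite_append_pair _ _ _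

-- B's sort branch equals the stable sort of the zipped pairs, unzipped
theorem alt_sort_eq (E C : List (List Int)) (h : E.length ≤ C.length) :
    (PySem.List.sorted (PySem.Set.ofList (E.map (fun s => (s.length : Int)))) (fun x => x)).foldl
        (fun acc L =>
          (PySem.List.enumerate (E.map (fun s => (s.length : Int)))).foldl
            (fun acc2 p =>
              if p.2 = L then
                (acc2.1 ++ [PySem.List.pyGetD E p.1 []], acc2.2 ++ [PySem.List.pyGetD C p.1 []])
              else acc2) acc) ([], [])
      = ((PySem.List.sorted (E.zip C) (fun p => ((p.1.length : Nat) : Int))).map (fun p => p.1),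
         (PySem.List.sorted (E.zip C) (fun p => ((p.1.length : Nat) : Int))).map (fun p => p.2)) := by
  have hinner := inner_eq E C h
  simp only [hinner]
  rw [foldl_append_pair2, ← List.map_flatMap, ← List.map_flatMap]
  rw [gather_eq_sorted (fun p : List Int × List Int => ((p.1.length : Nat) : Int))
        (PySem.List.sorted (PySem.Set.ofList (E.map (fun s => (s.length : Int)))) (fun x => x))
        (PySem.List.sorted_ofList_pairwise_lt _)
        (E.zip C)
        (fun p hp => by
          rw [PySem.List.mem_sorted, PySem.Set.mem_ofList, List.mem_map]
          exact ⟨p.1, (List.of_mem_zip hp).1, rfl⟩)]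
  simp

-- A's sorted pair list, expressed through the argsort
theorem argsort_pair_eq (E C : List (List Int)) (h : E.length ≤ C.length) :
    PySem.List.sorted (E.zip C) (fun p => ((p.1.length : Nat) : Int))
      = (pvLenArgsort E).map (fun i => (PySem.List.pyGetD E i [], PySem.List.pyGetD C i [])) := by
  rw [← map_pair_range_eq_zip E C h, sorted_map_comm]
  unfold pvLenArgsort
  congr 1
  exact sorted_key_natCast _ (fun i => (PySem.List.pyGetD E i []).length)

theorem encode_sentence_spec : Claim_equal_encode_sentence := by
  intro en_sents cn_sents en_vocab cn_vocab sort _hdom hpre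
  unfold Spec_encode_sentence encode_sentence encode_sentence_alt
  cases sort with
  | false => rfl
  | true =>
    simp only [reduceIte]
    set E := en_sents.map (fun sent => sent.map (fun word => pvLookup en_vocab word)) with hE
    set C := cn_sents.map (fun sent => sent.map (fun word => pvLookup cn_vocab word)) with hC
    have hlen : E.length ≤ C.length := by
      simp [hE, hC]; exact hpre rfl
    rw [alt_sort_eq E C hlen, argsort_pair_eq E C hlen, List.map_map, List.map_map]
    simp [Function.comp]
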